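-- pv_equiv track=rewrite | github.com/FormFluentAI/rulesmaker | src/rules_maker/utils/main_utils.py | is_documentation_url
-- ===== SOURCE A (Python) =====
-- def is_documentation_url(url: str) -> bool:
--     """Check if a URL likely points to documentation."""
--     doc_indicators = [
--         'docs',
--         'documentation',
--         'guide',
--         'manual',
--         'reference',
--         'wiki',
--         'help',
--         'tutorial',
--         'api',
--         'readme'
--     ]
--
--     url_lower = url.lower()
--     return any(indicator in url_lower for indicator in doc_indicators)
-- ===== SOURCE B (Python) =====
-- def is_documentation_url(url: str) -> bool:
--     """Check if a URL likely points to documentation."""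
--     kws = [
--         'docs',
--         'documentation',
--         'guide',
--         'manual',
--         'reference',
--         'wiki',
--         'help',
--         'tutorial',
--         'api',
--         'readme'
--     ]
--     # Streaming multi-pattern matcher: scan the string once, keeping the set of
--     # live partial matches (keyword remainders) and advancing them per character.
--     active = []
--     for ch in url.lower():
--         nxt = []
--         for rem in active + kws:
--             if rem.startswith(ch):
--                 if len(rem) == 1:
--                     return True
--                 nxt.append(rem[1:])
--         active = nxt
--     return False
-- ===== Notes on version B (the rewrite author's own statement) =====
-- stated objective: alternative
-- what changed: Replaced the per-keyword full substring scans with a single left-to-right streaming pass that maintains the set of live partial matches (keyword remainders) and advances each by one character per step, NFA-style.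
import Mathlib
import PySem

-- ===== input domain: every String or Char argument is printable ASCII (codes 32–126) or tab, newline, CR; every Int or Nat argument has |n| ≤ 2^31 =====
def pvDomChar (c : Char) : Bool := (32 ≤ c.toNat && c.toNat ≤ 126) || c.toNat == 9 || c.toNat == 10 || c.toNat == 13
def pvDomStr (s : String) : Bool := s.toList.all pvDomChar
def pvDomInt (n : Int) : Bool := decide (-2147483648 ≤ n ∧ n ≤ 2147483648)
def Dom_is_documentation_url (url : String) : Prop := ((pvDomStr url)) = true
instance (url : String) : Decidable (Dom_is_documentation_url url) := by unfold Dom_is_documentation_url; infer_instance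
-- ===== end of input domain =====

-- B replaces A's per-keyword full substring scans by one streaming left-to-right pass that
-- keeps the set of live partial matches (keyword remainders) and advances them one character
-- at a time (NFA-style multi-pattern matching); objective: alternative algorithm, same result.


-- ===== PORT A =====
def is_documentation_url (url : String) : Bool :=
  let doc_indicators : List String :=
    ["docs", "documentation", "guide", "manual", "reference",
     "wiki", "help", "tutorial", "api", "readme"]
  let url_lower := PySem.Str.lower url
  doc_indicators.any (fun indicator => PySem.Str.isIn indicator url_lower)

-- ===== PORT B =====
-- B's keyword list, as character lists
def kwChars : List (List Char) :=
  ["docs".toList, "documentation".toList, "guide".toList, "manual".toList,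
   "reference".toList, "wiki".toList, "help".toList, "tutorial".toList,
   "api".toList, "readme".toList]

-- B's inner loop over `active + kws`: advance each remainder by ch, building nxt in order;
-- `none` encodes B's early `return True` (a keyword's last character just matched).
-- rem.startswith(ch) on the empty remainder is False (skip); that case never occurs at runtime.
def stepDoc (ch : Char) : List (List Char) → Option (List (List Char))
  | [] => some []
  | rem :: rest =>
    match rem with
    | [] => stepDoc ch rest
    | c :: cs =>
      if c == ch then
        if cs = [] then none
        else
          match stepDoc ch rest with
          | none => none
          | some nxt => some (cs :: nxt)
      else stepDoc ch rest

-- B's outer loop over the characters of url.lower(), threading the live-remainder set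
def scanDoc : List Char → List (List Char) → Bool
  | [], _ => false
  | ch :: rest, active =>
    match stepDoc ch (active ++ kwChars) with
    | none => true
    | some nxt => scanDoc rest nxt

def is_documentation_url_alt (url : String) : Bool :=
  scanDoc (PySem.Chars.lower url.toList) []

-- ===== PRECONDITION & SPEC =====
def Spec_is_documentation_url (url : String) (out : Bool) : Prop := out = is_documentation_url_alt url
instance (url : String) (out : Bool) : Decidable (Spec_is_documentation_url url out) := by unfold Spec_is_documentation_url; infer_instance

-- ===== CLAIM (what is proved, stated in full; the proofs are below) =====
def Claim_equal_is_documentation_url : Prop := ∀ (url : String), Dom_is_documentation_url url → Spec_is_documentation_url url (is_documentation_url url)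

-- ===== LEMMAS AND PROOFS =====

-- contract of one advance of a single remainder by ch
def advanceRem (ch : Char) (r : List Char) : Option (List Char) :=
  match r with
  | [] => none
  | c :: cs => if c == ch then some cs else none

theorem stepDoc_spec (ch : Char) (rems : List (List Char)) :
    stepDoc ch rems =
      if [ch] ∈ rems then none
      else some (rems.filterMap (advanceRem ch)) := by
  induction rems with
  | nil => simp [stepDoc]
  | cons rem rest ih =>
    rcases rem with _ | ⟨c, cs⟩
    · simpa [stepDoc, advanceRem] using ih
    · by_cases hc : c = ch
      · by_cases hcs : cs = []
        · subst hc; subst hcs; simp [stepDoc]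
        · have hne : ([ch] : List Char) ≠ c :: cs := by
            intro h; injection h with h1 h2; exact hcs h2.symm
          have hcb : (c == ch) = true := by simp [hc]
          simp only [stepDoc, if_true, if_neg hcs, ih, List.mem_cons,
            List.filterMap_cons, advanceRem, hcb]
          by_cases hm : ([ch] : List Char) ∈ rest <;> simp [hm, hne]
      · have hne : ([ch] : List Char) ≠ c :: cs := by
          intro h; injection h with h1 h2; exact hc h1.symm
        have hcb : (c == ch) = false := by simp [hc]
        simp only [stepDoc, Bool.false_eq_true, if_false, ih, List.mem_cons,
          List.filterMap_cons, advanceRem, hcb]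
        simp [hne]

theorem scanDoc_spec (s : List Char) : ∀ (active : List (List Char)),
    scanDoc s active = true ↔
      (∃ r ∈ active, r ≠ [] ∧ r <+: s) ∨ (∃ kw ∈ kwChars, kw ≠ [] ∧ kw <:+: s) := by
  induction s with
  | nil =>
    intro active
    simp only [scanDoc, Bool.false_eq_true, false_iff]
    rintro (⟨r, _, hne, hp⟩ | ⟨kw, _, hne, hi⟩)
    · exact hne (List.prefix_nil.mp hp)
    · exact hne (List.infix_nil.mp hi)
  | cons ch rest ih =>
    intro active
    simp only [scanDoc, stepDoc_spec]
    by_cases hm : ([ch] : List Char) ∈ active ++ kwChars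
    · simp only [if_pos hm, true_iff]
      rcases List.mem_append.mp hm with h | h
      · exact Or.inl ⟨[ch], h, by simp, by simp⟩
      · exact Or.inr ⟨[ch], h, by simp,
          List.IsPrefix.isInfix (by simp : ([ch] : List Char) <+: ch :: rest)⟩
    · simp only [if_neg hm, ih]
      have hmem : ∀ r' : List Char,
          r' ∈ (active ++ kwChars).filterMap (advanceRem ch) ↔
            ∃ r ∈ active ++ kwChars, r = ch :: r' := by
        intro r'
        simp only [List.mem_filterMap]
        constructor
        · rintro ⟨r, hr, hadv⟩
          refine ⟨r, hr, ?_⟩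
          match r with
          | [] => simp [advanceRem] at hadv
          | c :: cs =>
            simp only [advanceRem] at hadv
            by_cases hc : c = ch
            · subst hc; simp at hadv; simp [hadv]
            · simp [hc] at hadv
        · rintro ⟨r, hr, rfl⟩
          exact ⟨ch :: r', hr, by simp [advanceRem]⟩
      constructor
      · rintro (⟨r', hr', hne, hp⟩ | ⟨kw, hkw, hne, hi⟩)
        · obtain ⟨r, hr, rfl⟩ := (hmem r').mp hr'
          rcases List.mem_append.mp hr with h | h
          · exact Or.inl ⟨ch :: r', h, by simp, List.cons_prefix_cons.mpr ⟨rfl, hp⟩⟩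
          · exact Or.inr ⟨ch :: r', h, by simp,
              (List.cons_prefix_cons.mpr ⟨rfl, hp⟩ : ch :: r' <+: ch :: rest).isInfix⟩
        · exact Or.inr ⟨kw, hkw, hne, hi.trans (List.suffix_cons ch rest).isInfix⟩
      · rintro (⟨r, hr, hne, hp⟩ | ⟨kw, hkw, hne, hi⟩)
        · rcases r with _ | ⟨c, cs⟩
          · exact absurd rfl hne
          · obtain ⟨hceq, hcs⟩ := List.cons_prefix_cons.mp hp
            rw [hceq] at hr
            have hcsne : cs ≠ [] := by
              rintro rfl
              exact hm (List.mem_append.mpr (Or.inl hr))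
            exact Or.inl ⟨cs, (hmem cs).mpr ⟨ch :: cs, List.mem_append.mpr (Or.inl hr), rfl⟩,
              hcsne, hcs⟩
        · rcases List.infix_cons_iff.mp hi with hp | hi'
          · rcases kw with _ | ⟨c, cs⟩
            · exact absurd rfl hne
            · obtain ⟨hceq, hcs⟩ := List.cons_prefix_cons.mp hp
              rw [hceq] at hkw
              have hcsne : cs ≠ [] := by
                rintro rfl
                exact hm (List.mem_append.mpr (Or.inr hkw))
              exact Or.inl ⟨cs, (hmem cs).mpr ⟨ch :: cs, List.mem_append.mpr (Or.inr hkw), rfl⟩,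
                hcsne, hcs⟩
          · exact Or.inr ⟨kw, hkw, hne, hi'⟩

-- ===== VERDICT (by name: the statement is the Claim_ definition above) =====
theorem is_documentation_url_spec : Claim_equal_is_documentation_url := by
  intro url _
  unfold Spec_is_documentation_url
  rw [Bool.eq_iff_iff]
  rw [is_documentation_url_alt, scanDoc_spec]
  simp only [false_and, exists_false, false_or, List.mem_nil_iff]
  simp only [is_documentation_url, List.any_eq_true, PySem.Str.isIn_iff_infix,
    PySem.Str.toList_lower]
  constructor
  · rintro ⟨a, ha, hi⟩
    fin_cases ha <;> exact ⟨_, by decide, by decide, hi⟩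
  · rintro ⟨kw, hkw, _, hi⟩
    fin_cases hkw <;> exact ⟨_, by decide, hi⟩
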